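-- pv_equiv track=rewrite | github.com/jk-jung/problem-solving | codewars/6kyu/6_Begin your day with a challenge, but an easy one..py | one_two_three
-- ===== SOURCE A (Python) =====
-- def one_two_three(n):
--     if not n: return [0, 0]
--     r = 0
--     m = n
--     while m > 0:
--         r = r * 10 + (9 if m >= 9 else m)
--         m -= 9
--     return [r, int('1' * n)]
-- ===== SOURCE B (Python) =====
-- def one_two_three(n):
--     if not n: return [0, 0]
--     q, rem = divmod(n, 9)
--     small = (10 ** q - 1) * (10 if rem else 1) + rem
--     return [small, int('1' * n)]
-- ===== Notes on version B (the rewrite author's own statement) =====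
-- stated objective: simpler
-- what changed: Replaces the while-loop that accumulates digits nine by nine with a closed form: divmod(n, 9) and the formula (10**q - 1)*(10 if rem else 1) + rem.
import Mathlib
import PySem

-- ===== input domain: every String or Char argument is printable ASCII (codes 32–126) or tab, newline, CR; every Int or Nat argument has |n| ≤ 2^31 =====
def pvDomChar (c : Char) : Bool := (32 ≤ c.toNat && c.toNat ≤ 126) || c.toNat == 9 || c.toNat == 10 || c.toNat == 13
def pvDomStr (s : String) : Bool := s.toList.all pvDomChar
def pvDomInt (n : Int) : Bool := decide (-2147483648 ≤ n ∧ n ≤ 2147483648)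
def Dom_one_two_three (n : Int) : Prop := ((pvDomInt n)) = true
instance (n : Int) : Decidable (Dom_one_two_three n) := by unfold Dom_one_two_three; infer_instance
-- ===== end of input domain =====

-- B replaces A's digit-accumulating while-loop by a closed form (divmod(n,9) and one
-- arithmetic formula); objective: simpler. Equality is on the return value.

-- ===== PORT A =====
-- int('1' * n) : shared literal subexpression of both Pythons ('1'*n then int(...));
-- none = ValueError (n < 0, empty string), excluded by Pre_.
def pvRepunit? (n : Int) : Option Int :=
  PySem.Int.ofChars? (PySem.List.pyRepeat ['1'] n)

-- the while-loop: r = r*10 + (9 if m >= 9 else m); m -= 9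
def oneLoopA (r m : Int) : Int :=
  if h : 0 < m then oneLoopA (r * 10 + (if 9 ≤ m then 9 else m)) (m - 9) else r
termination_by m.toNat
decreasing_by omega

def one_two_three (n : Int) : List Int :=
  if n = 0 then [0, 0]
  else
    match pvRepunit? n with
    | some v => [oneLoopA 0 n, v]
    | none => []   -- unreachable under Pre_ (ValueError in Python)

-- ===== PORT B =====
def one_two_three_alt (n : Int) : List Int :=
  if n = 0 then [0, 0]
  else
    let q := PySem.Int.floordiv n 9
    let rem := PySem.Int.mod n 9
    -- 10 ** q : exact for q ≥ 0, which holds whenever n ≥ 0 (Pre_)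
    let small := (10 ^ q.toNat - 1) * (if rem ≠ 0 then 10 else 1) + rem
    match pvRepunit? n with
    | some v => [small, v]
    | none => []   -- unreachable under Pre_ (ValueError in Python)

-- ===== PRECONDITION & SPEC =====
-- Pre_ excludes negative n, where both Pythons raise ValueError at int('1' * n).
def Pre_one_two_three (n : Int) : Prop := 0 ≤ n
instance (n : Int) : Decidable (Pre_one_two_three n) := by unfold Pre_one_two_three; infer_instance
def pvWitness_one_two_three : Int := (7)

def Spec_one_two_three (n : Int) (out : List Int) : Prop := out = one_two_three_alt n
instance (n : Int) (out : List Int) : Decidable (Spec_one_two_three n out) := by unfold Spec_one_two_three; infer_instance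

-- ===== CLAIM (what is proved, stated in full; the proofs are below) =====
def Claim_equal_one_two_three : Prop := ∀ (n : Int), Dom_one_two_three n → Pre_one_two_three n → Spec_one_two_three n (one_two_three n)

-- ===== LEMMAS AND PROOFS =====

-- closed form of the while-loop: for m = 9*q + rem with 0 ≤ rem < 9 and m > 0,
-- the loop appends q nines and then rem (if nonzero) to r's digits.
theorem oneLoopA_closed (q : Nat) : ∀ (rem r : Int), 0 ≤ rem → rem < 9 → 0 < 9 * q + rem →
    oneLoopA r (9 * q + rem) =
      r * 10 ^ (if rem = 0 then q else q + 1) + (10 ^ q - 1) * (if rem = 0 then 1 else 10) + rem := by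
  induction q with
  | zero =>
    intro rem r h0 h9 hpos
    simp only [Nat.cast_zero, mul_zero, zero_add] at hpos ⊢
    rw [oneLoopA, dif_pos hpos, if_neg (by omega), oneLoopA, dif_neg (show ¬ (0:Int) < rem - 9 by omega)]
    rw [if_neg (by omega), if_neg (by omega)]
    ring
  | succ q ih =>
    intro rem r h0 h9 hpos
    have hm : 9 * ((q + 1 : Nat) : Int) + rem = 9 * (q : Int) + rem + 9 := by push_cast; ring
    rw [hm, oneLoopA, dif_pos (by omega), if_pos (by omega),
        show 9 * (q : Int) + rem + 9 - 9 = 9 * (q : Int) + rem from by ring]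
    by_cases hz : 0 < 9 * (q : Int) + rem
    · rw [ih rem (r * 10 + 9) h0 h9 hz]
      by_cases hr : rem = 0
      · subst hr
        norm_num
        ring
      · simp only [if_neg hr]
        ring
    · -- 9*q + rem = 0, i.e. q = 0 and rem = 0 : one more unfold terminates the loop
      have hq0' : q = 0 := by omega
      have hr0 : rem = 0 := by omega
      subst hq0'
      rw [hr0, oneLoopA, dif_neg (show ¬ (0:Int) < 9 * ((0:Nat):Int) + 0 by norm_num)]
      norm_num

theorem oneLoopA_eq_closed (n : Int) (hn : 0 < n) :
    oneLoopA 0 n =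
      (10 ^ (PySem.Int.floordiv n 9).toNat - 1) * (if PySem.Int.mod n 9 ≠ 0 then 10 else 1)
        + PySem.Int.mod n 9 := by
  set q0 := PySem.Int.floordiv n 9 with hq0
  set rem := PySem.Int.mod n 9 with hrem
  have hdm : q0 * 9 + rem = n := PySem.Int.floordiv_mul_add_mod n 9
  have hr0 : 0 ≤ rem := PySem.Int.mod_nonneg n (show (0:Int) < 9 by norm_num)
  have hr9 : rem < 9 := PySem.Int.mod_lt n (show (0:Int) < 9 by norm_num)
  have hq0nn : 0 ≤ q0 := by omega
  have hcast : ((q0.toNat : Int)) = q0 := Int.toNat_of_nonneg hq0nn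
  have hn' : n = 9 * (q0.toNat : Int) + rem := by rw [hcast]; omega
  rw [hn', oneLoopA_closed q0.toNat rem 0 hr0 hr9 (by rw [← hn']; exact hn)]
  by_cases hr : rem = 0
  · simp [hr]
  · simp [hr]

-- ===== VERDICT (by name: the statement is the Claim_ definition above) =====
theorem one_two_three_spec : Claim_equal_one_two_three := by
  intro n _ hpre
  unfold Spec_one_two_three one_two_three one_two_three_alt
  by_cases h0 : n = 0
  · simp [h0]
  · have hn : 0 < n := lt_of_le_of_ne hpre (Ne.symm h0)
    rw [if_neg h0, if_neg h0]
    cases hparse : pvRepunit? n with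
    | none => rfl
    | some v =>
      simp only [List.cons.injEq, and_true]
      exact oneLoopA_eq_closed n hn
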